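-- pv_equiv track=rewrite | github.com/parallelno/Vector06c | Vector06c_Dev/_Projects/GameNoname/scripts/common.py | words_to_asm
-- ===== SOURCE A (Python) =====
-- def words_to_asm(data, numbers_in_line = 16):
-- 	asm = ""
-- 	for i, byte in enumerate(data):
-- 		if i % numbers_in_line == 0:
-- 			if i != 0:
-- 				asm += "\n"
-- 			asm += "			.word "
-- 		asm += str(byte) + ","
-- 	return asm + "\n"
-- ===== SOURCE B (Python) =====
-- def words_to_asm(data, numbers_in_line = 16):
-- 	lines = []
-- 	for i in range(0, len(data), numbers_in_line):
-- 		lines.append("\t\t\t.word " + ",".join(str(b) for b in data[i:i+numbers_in_line]) + ",")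
-- 	return "\n".join(lines) + "\n"
-- ===== Notes on version B (the rewrite author's own statement) =====
-- stated objective: simpler
-- what changed: B groups data into chunks of numbers_in_line first (range-with-step slicing) and joins formatted chunk lines, instead of tracking line boundaries per element with a modulo test and newline/header state inside one accumulator loop.
-- outside the precondition, e.g. on words_to_asm([], 0): A returns '\n', B raises ValueError; on words_to_asm([1, 2, 3], -2): A returns '\t\t\t.word 1,2,\n\t\t\t.word 3,\n', B returns '\n'
import Mathlib
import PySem

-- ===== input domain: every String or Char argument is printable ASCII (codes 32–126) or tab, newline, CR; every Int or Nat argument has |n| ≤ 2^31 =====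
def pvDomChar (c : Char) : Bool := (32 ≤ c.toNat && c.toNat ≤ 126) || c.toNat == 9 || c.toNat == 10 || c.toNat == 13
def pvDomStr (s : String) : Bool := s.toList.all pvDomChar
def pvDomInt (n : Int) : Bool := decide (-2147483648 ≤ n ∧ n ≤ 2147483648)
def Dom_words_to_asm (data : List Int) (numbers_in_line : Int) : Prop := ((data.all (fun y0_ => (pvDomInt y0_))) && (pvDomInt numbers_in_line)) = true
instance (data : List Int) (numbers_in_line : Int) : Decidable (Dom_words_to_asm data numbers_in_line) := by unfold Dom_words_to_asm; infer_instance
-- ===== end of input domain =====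

-- B formats by chunking the data first (range with step + slices) and joining formatted lines,
-- instead of A's per-element modulo/newline accumulator loop; objective: simpler.

-- ===== PORT A =====
def words_to_asm (data : List Int) (numbers_in_line : Int) : String :=
  ((PySem.List.enumerate data 0).foldl (fun asm p =>
      (if PySem.Int.mod p.1 numbers_in_line == 0 then
          (if p.1 != 0 then asm ++ "\n" else asm) ++ "\t\t\t.word "
        else asm) ++ PySem.Int.toStr p.2 ++ ",") "") ++ "\n"

-- ===== PORT B =====
def words_to_asm_alt (data : List Int) (numbers_in_line : Int) : String :=
  let lines := (PySem.List.pyRange 0 (data.length : Int) numbers_in_line).map (fun i =>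
    "\t\t\t.word " ++
      PySem.Str.join "," ((PySem.List.slice data (some i) (some (i + numbers_in_line))).map PySem.Int.toStr)
      ++ ",")
  PySem.Str.join "\n" lines ++ "\n"

-- ===== PRECONDITION & SPEC =====
-- Pre_ excludes numbers_in_line ≤ 0, outside the natural domain of a chunk size: there A raises
-- ZeroDivisionError on nonempty data at 0, and otherwise A's value (grouping by |n|, or '\n')
-- is an accident of the modulo test that B's empty range cannot and should not reproduce.
def Pre_words_to_asm (data : List Int) (numbers_in_line : Int) : Prop :=
  1 ≤ numbers_in_line
instance (data : List Int) (numbers_in_line : Int) : Decidable (Pre_words_to_asm data numbers_in_line) := by unfold Pre_words_to_asm; infer_instance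
def pvWitness_words_to_asm : List Int × Int := ([1, 2, 3], 2)
def Spec_words_to_asm (data : List Int) (numbers_in_line : Int) (out : String) : Prop := out = words_to_asm_alt data numbers_in_line
instance (data : List Int) (numbers_in_line : Int) (out : String) : Decidable (Spec_words_to_asm data numbers_in_line out) := by unfold Spec_words_to_asm; infer_instance

-- ===== CLAIM (what is proved, stated in full; the proofs are below) =====
def Claim_equal_words_to_asm : Prop := ∀ (data : List Int) (numbers_in_line : Int), Dom_words_to_asm data numbers_in_line → Pre_words_to_asm data numbers_in_line → Spec_words_to_asm data numbers_in_line (words_to_asm data numbers_in_line)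

-- ===== LEMMAS AND PROOFS =====

-- the body of A's loop, named for the proofs (definitionally the lambda in the port)
def pvStep (n : Int) (asm : String) (p : Int × Int) : String :=
  (if PySem.Int.mod p.1 n == 0 then
      (if p.1 != 0 then asm ++ "\n" else asm) ++ "\t\t\t.word "
    else asm) ++ PySem.Int.toStr p.2 ++ ","

-- chunks of size m (used with 1 ≤ m)
def pvChunks (m : Nat) : List Int → List (List Int)
  | [] => []
  | x :: xs => (x :: xs.take (m - 1)) :: pvChunks m (xs.drop (m - 1))
  termination_by l => l.length
  decreasing_by simp

def pvCats : List String → String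
  | [] => ""
  | s :: r => s ++ pvCats r

def pvLine (c : List Int) : String :=
  "\t\t\t.word " ++ PySem.Str.join "," (c.map PySem.Int.toStr) ++ ","

def pvCatStr (c : List Int) : String := pvCats (c.map (fun b => PySem.Int.toStr b ++ ","))

theorem pvChunks_ne_nil (m : Nat) (xs : List Int) : ∀ c ∈ pvChunks m xs, c ≠ [] := by
  induction xs using pvChunks.induct m with
  | case1 => simp [pvChunks]
  | case2 x xs ih =>
    intro c hc
    rw [pvChunks] at hc
    rcases List.mem_cons.mp hc with h | h
    · simp [h]
    · exact ih c h

theorem pvStrJoin_nil (sep : String) : PySem.Str.join sep [] = "" := by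
  apply String.toList_inj.mp
  simp [PySem.Str.toList_join, PySem.Chars.join_nil]

theorem pvStrJoin_singleton (sep p : String) : PySem.Str.join sep [p] = p := by
  apply String.toList_inj.mp
  simp [PySem.Str.toList_join, PySem.Chars.join_singleton]

theorem pvStrJoin_cons_cons (sep p q : String) (rest : List String) :
    PySem.Str.join sep (p :: q :: rest) = p ++ sep ++ PySem.Str.join sep (q :: rest) := by
  apply String.toList_inj.mp
  simp [PySem.Str.toList_join, PySem.Chars.join_cons_cons, String.toList_append]

theorem pvCatStr_cons (b : Int) (c : List Int) :
    pvCatStr (b :: c) = (PySem.Int.toStr b ++ ",") ++ pvCatStr c := by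
  simp [pvCatStr, pvCats]

theorem pvJoinComma (c : List Int) (hc : c ≠ []) :
    PySem.Str.join "," (c.map PySem.Int.toStr) ++ "," = pvCatStr c := by
  induction c with
  | nil => simp at hc
  | cons b c ih =>
    cases c with
    | nil => simp [pvStrJoin_singleton, pvCatStr, pvCats, String.append_empty]
    | cons b2 c2 =>
      rw [List.map_cons, List.map_cons, pvStrJoin_cons_cons, pvCatStr_cons, ← ih (by simp)]
      apply String.toList_inj.mp
      simp [String.toList_append]

theorem pvLine_eq (c : List Int) (hc : c ≠ []) :
    pvLine c = "\t\t\t.word " ++ pvCatStr c := by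
  rw [pvLine, ← pvJoinComma c hc, String.append_assoc]

theorem pvJoin_cons (l : String) (ls : List String) :
    PySem.Str.join "\n" (l :: ls) = l ++ pvCats (ls.map (fun x => "\n" ++ x)) := by
  induction ls generalizing l with
  | nil => simp [pvStrJoin_singleton, pvCats, String.append_empty]
  | cons q rest ih =>
    rw [pvStrJoin_cons_cons, ih q, List.map_cons]
    apply String.toList_inj.mp
    simp [String.toList_append, pvCats]

theorem pvPyRange_pos_nil (a b s : Int) (hs : 0 < s) (hab : b ≤ a) :
    PySem.List.pyRange a b s = [] := by
  rw [PySem.List.pyRange_of_pos a b hs, if_neg (by omega)]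
  simp

theorem pvPyRange_pos_cons (a b s : Int) (hs : 0 < s) (hab : a < b) :
    PySem.List.pyRange a b s = a :: PySem.List.pyRange (a + s) b s := by
  rw [PySem.List.pyRange_of_pos a b hs, PySem.List.pyRange_of_pos (a + s) b hs,
    if_pos hab]
  by_cases h2 : a + s < b
  · rw [if_pos h2]
    have hnn : 0 ≤ (b - (a + s) + s - 1) / s := Int.ediv_nonneg (by omega) (by omega)
    have hdiv : (b - a + s - 1) / s = (b - (a + s) + s - 1) / s + 1 := by
      have := Int.add_mul_ediv_right (b - (a + s) + s - 1) 1 (show s ≠ 0 by omega)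
      rw [show b - a + s - 1 = b - (a + s) + s - 1 + 1 * s by ring, this]
    rw [hdiv, show ((b - (a + s) + s - 1) / s + 1).toNat = ((b - (a + s) + s - 1) / s).toNat + 1 by omega,
      List.range_succ_eq_map]
    simp only [List.map_cons, List.map_map, Nat.cast_zero, mul_zero, add_zero,
      List.cons.injEq, true_and]
    apply List.map_congr_left
    intro k _
    simp [Function.comp, Nat.succ_eq_add_one]
    ring
  · rw [if_neg h2]
    have h1 : (1 : Int) ≤ (b - a + s - 1) / s := by
      rw [Int.le_ediv_iff_mul_le hs]; omega
    have h2' : (b - a + s - 1) / s < 2 := by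
      rw [Int.ediv_lt_iff_lt_mul hs]; omega
    have : ((b - a + s - 1) / s).toNat = 1 := by omega
    rw [this]
    simp

-- B computes the chunk lines
theorem pvB_chunks (m : Nat) (hm : 1 ≤ m) :
    ∀ (k : Nat) (data : List Int) (s : Nat), data.length - s ≤ k →
    (PySem.List.pyRange (s : Int) (data.length : Int) (m : Int)).map (fun i =>
      "\t\t\t.word " ++
        PySem.Str.join "," ((PySem.List.slice data (some i) (some (i + (m : Int)))).map PySem.Int.toStr)
        ++ ",")
    = (pvChunks m (data.drop s)).map pvLine := by
  intro k
  induction k with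
  | zero =>
    intro data s hk
    have hle : data.length ≤ s := by omega
    rw [pvPyRange_pos_nil _ _ _ (by exact_mod_cast hm) (by exact_mod_cast hle),
      List.drop_eq_nil_of_le hle]
    simp [pvChunks]
  | succ k ih =>
    intro data s hk
    by_cases hlt : s < data.length
    · rw [pvPyRange_pos_cons _ _ _ (by exact_mod_cast hm) (by exact_mod_cast hlt)]
      rw [List.map_cons]
      cases hD : data.drop s with
      | nil => exact absurd (List.drop_eq_nil_iff.mp hD) (by omega)
      | cons x xs =>
        have hxs : xs = data.drop (s + 1) := by
          have : List.drop 1 (data.drop s) = List.drop (s + 1) data := List.drop_drop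
          rw [hD] at this
          simpa using this
        rw [pvChunks, List.map_cons]
        have hslice : PySem.List.slice data (some (s : Int)) (some ((s : Int) + (m : Int)))
            = List.take m (List.drop s data) := PySem.List.slice_natCast_add data s m
        have htake : List.take m (List.drop s data) = x :: List.take (m - 1) xs := by
          rw [hD, show m = (m - 1) + 1 by omega]
          simp
        have htail : xs.drop (m - 1) = data.drop (s + m) := by
          rw [hxs, List.drop_drop, show s + 1 + (m - 1) = s + m by omega]
        have hcast : (s : Int) + (m : Int) = ((s + m : Nat) : Int) := by push_cast; ring
        rw [hslice, htake, htail, hcast, ih data (s + m) (by omega)]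
        exact congrArg₂ List.cons rfl rfl
    · have hle : data.length ≤ s := by omega
      rw [pvPyRange_pos_nil _ _ _ (by exact_mod_cast hm) (by exact_mod_cast hle),
        List.drop_eq_nil_of_le hle]
      simp [pvChunks]

-- A's fold over a run of indices containing no multiple of n
theorem pvA_inner (n : Int) (c : List Int) :
    ∀ (s : Int) (acc : String), (∀ j : Int, s ≤ j → j < s + c.length → ¬ (n ∣ j)) →
    (PySem.List.enumerate c s).foldl (pvStep n) acc = acc ++ pvCatStr c := by
  induction c with
  | nil =>
    intro s acc h
    simp [PySem.List.enumerate_nil, pvCatStr, pvCats, String.append_empty]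
  | cons b c ih =>
    intro s acc h
    rw [PySem.List.enumerate_cons, List.foldl_cons]
    have hnd : ¬ (n ∣ s) := h s le_rfl (by simp only [List.length_cons]; push_cast; omega)
    have hstep : pvStep n acc (s, b) = acc ++ (PySem.Int.toStr b ++ ",") := by
      rw [pvStep, if_neg (by simp [PySem.Int.mod_eq_zero_iff_dvd]; exact hnd)]
      rw [String.append_assoc]
    rw [hstep, ih (s + 1) _ (by
      intro j h1 h2
      refine h j (by omega) ?_
      simp only [List.length_cons] at h2 ⊢
      push_cast at h2 ⊢
      omega)]
    apply String.toList_inj.mp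
    simp [pvCats, pvCatStr_cons, String.toList_append, List.append_assoc]

-- A's fold from a positive multiple of m produces "\n"-prefixed chunk lines
theorem pvA_pos (m : Nat) (hm : 1 ≤ m) :
    ∀ (k : Nat) (xs : List Int) (s : Int) (acc : String), xs.length ≤ k →
      0 < s → (m : Int) ∣ s →
    (PySem.List.enumerate xs s).foldl (pvStep (m : Int)) acc
      = acc ++ pvCats ((pvChunks m xs).map (fun c => "\n" ++ ("\t\t\t.word " ++ pvCatStr c))) := by
  intro k
  induction k with
  | zero =>
    intro xs s acc hk _ _
    have : xs = [] := List.length_eq_zero_iff.mp (by omega)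
    subst this
    simp [PySem.List.enumerate_nil, pvChunks, pvCats, String.append_empty]
  | succ k ih =>
    intro xs s acc hk hs hdvd
    cases xs with
    | nil => simp [PySem.List.enumerate_nil, pvChunks, pvCats, String.append_empty]
    | cons x rest =>
      have e1 : PySem.List.enumerate (x :: rest) s
          = PySem.List.enumerate (x :: rest.take (m - 1)) s
            ++ PySem.List.enumerate (rest.drop (m - 1)) (s + ((x :: rest.take (m - 1)).length : Int)) := by
        conv_lhs => rw [show x :: rest = (x :: rest.take (m - 1)) ++ rest.drop (m - 1) by
          simp [List.take_append_drop]]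
        exact PySem.List.enumerate_append _ _ _
      rw [e1, List.foldl_append, PySem.List.enumerate_cons, List.foldl_cons]
      have hstep : pvStep (m : Int) acc (s, x)
          = ((acc ++ "\n") ++ "\t\t\t.word ") ++ PySem.Int.toStr x ++ "," := by
        rw [pvStep, if_pos (by simp [PySem.Int.mod_eq_zero_iff_dvd]; exact hdvd),
          if_pos (by simp [bne_iff_ne]; omega)]
      rw [hstep,
        pvA_inner (m : Int) (rest.take (m - 1)) (s + 1) _ (by
          intro j h1 h2 hdj
          have h3 : (rest.take (m - 1)).length ≤ m - 1 := by
            simp [List.length_take]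
          have hj : j - s < (m : Int) := by
            have : ((rest.take (m - 1)).length : Int) ≤ (m : Int) - 1 := by
              omega
            omega
          have : (m : Int) ∣ (j - s) := Dvd.dvd.sub hdj hdvd
          have hjs : 0 < j - s := by omega
          have := Int.le_of_dvd hjs this
          omega)]
      rw [pvChunks, List.map_cons]
      cases hT : rest.drop (m - 1) with
      | nil =>
        simp only [PySem.List.enumerate_nil, List.foldl_nil, pvChunks, List.map_nil]
        apply String.toList_inj.mp
        simp [pvCats, pvCatStr_cons, String.toList_append, List.append_assoc]
      | cons y ys =>
        have hrl : m - 1 ≤ rest.length := by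
          have := congrArg List.length hT
          simp [List.length_drop] at this
          omega
        have hclen : ((x :: rest.take (m - 1)).length : Int) = (m : Int) := by
          simp [List.length_take]
          omega
        rw [hclen, ih (y :: ys) (s + (m : Int)) _ (by
            have := congrArg List.length hT
            simp [List.length_drop] at this hk ⊢
            omega) (by omega) (Dvd.dvd.add hdvd dvd_rfl)]
        apply String.toList_inj.mp
        simp [pvCats, pvCatStr_cons, String.toList_append, List.append_assoc]

-- ===== VERDICT (by name: the statement is the Claim_ definition above) =====
theorem words_to_asm_spec : Claim_equal_words_to_asm := by
  intro data n _ hpre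
  unfold Pre_words_to_asm at hpre
  unfold Spec_words_to_asm words_to_asm words_to_asm_alt
  obtain ⟨m, hm1, rfl⟩ : ∃ m : Nat, 1 ≤ m ∧ n = (m : Int) :=
    ⟨n.toNat, by omega, by omega⟩
  have hB := pvB_chunks m hm1 data.length data 0 (by omega)
  simp only [Nat.cast_zero, List.drop_zero] at hB
  rw [hB]
  dsimp only
  have hfun : (fun (asm : String) (p : Int × Int) =>
      (if PySem.Int.mod p.1 ((m : Nat) : Int) == 0 then
          (if p.1 != 0 then asm ++ "\n" else asm) ++ "\t\t\t.word "
        else asm) ++ PySem.Int.toStr p.2 ++ ",") = pvStep ((m : Nat) : Int) := rfl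
  rw [hfun]
  cases data with
  | nil =>
    simp only [pvChunks, List.map_nil, PySem.List.enumerate_nil, List.foldl_nil]
    rw [pvStrJoin_nil]
  | cons x rest =>
    -- B side: first line then "\n"-prefixed rest
    rw [pvChunks, List.map_cons, pvJoin_cons]
    -- A side: first element (index 0), then the rest of the first chunk, then full chunks
    have e1 : PySem.List.enumerate (x :: rest) 0
        = PySem.List.enumerate (x :: rest.take (m - 1)) 0
          ++ PySem.List.enumerate (rest.drop (m - 1)) (0 + ((x :: rest.take (m - 1)).length : Int)) := by
      conv_lhs => rw [show x :: rest = (x :: rest.take (m - 1)) ++ rest.drop (m - 1) by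
        simp [List.take_append_drop]]
      exact PySem.List.enumerate_append _ _ _
    rw [e1, List.foldl_append, PySem.List.enumerate_cons, List.foldl_cons]
    have hstep : pvStep (m : Int) "" (0, x)
        = ("" ++ "\t\t\t.word ") ++ PySem.Int.toStr x ++ "," := by
      rw [pvStep, if_pos (by simp [PySem.Int.mod_eq_zero_iff_dvd])]
      simp
    have hA1 := pvA_inner (m : Int) (rest.take (m - 1)) (0 + 1) (pvStep (m : Int) "" (0, x)) (by
      intro j h1 h2 hdj
      have h3 : ((rest.take (m - 1)).length : Int) ≤ (m : Int) - 1 := by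
        simp [List.length_take]
        omega
      have hj : j < (m : Int) := by omega
      have := Int.le_of_dvd (by omega) hdj
      omega)
    rw [hA1, hstep]
    cases hT : rest.drop (m - 1) with
    | nil =>
      simp only [PySem.List.enumerate_nil, List.foldl_nil, pvChunks, List.map_nil]
      rw [pvLine_eq _ (by simp)]
      apply String.toList_inj.mp
      simp [pvCats, pvCatStr_cons, String.toList_append, List.append_assoc]
    | cons y ys =>
      have hrl : m - 1 ≤ rest.length := by
        have := congrArg List.length hT
        simp [List.length_drop] at this
        omega
      have hclen : (0 : Int) + ((x :: rest.take (m - 1)).length : Int) = (m : Int) := by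
        simp [List.length_take]
        omega
      rw [hclen, pvA_pos m hm1 (y :: ys).length (y :: ys) (m : Int) _ le_rfl
        (by exact_mod_cast hm1) dvd_rfl]
      have hmap : List.map ((fun x => "\n" ++ x) ∘ pvLine) (pvChunks m (y :: ys))
          = List.map (fun c => "\n" ++ ("\t\t\t.word " ++ pvCatStr c)) (pvChunks m (y :: ys)) :=
        List.map_congr_left (fun c hc => by
          simp only [Function.comp_apply, pvLine_eq c (pvChunks_ne_nil m (y :: ys) c hc)])
      rw [pvLine_eq _ (by simp), List.map_map, hmap]
      apply String.toList_inj.mp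
      simp [pvCats, pvCatStr_cons, String.toList_append, List.append_assoc]
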